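-- pv_equiv track=rewrite | github.com/aulloa/Morse_Translator_Bot | translate_morse_input.py | whitespace
-- ===== SOURCE A (Python) =====
-- def whitespace(morse_string):
--     "finds indexes of spaces in string of morse letters"
--     x = 0
--     i_arry = []
--     while True:
--         i = morse_string.find (' ', x)
--         x = i+1
--         i_arry.append (i)
--         if i == -1:
--             break
--     return i_arry
-- ===== SOURCE B (Python) =====
-- def whitespace(morse_string):
--     "finds indexes of spaces in string of morse letters"
--     i_arry = [i for i, c in enumerate(morse_string) if c == ' ']
--     i_arry.append(-1)
--     return i_arry
-- ===== Notes on version B (the rewrite author's own statement) =====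
-- stated objective: simpler
-- what changed: Replaces the cursor-plus-repeated-str.find while loop with a single enumerate comprehension collecting space indexes, then one append of the terminal -1.
import Mathlib
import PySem

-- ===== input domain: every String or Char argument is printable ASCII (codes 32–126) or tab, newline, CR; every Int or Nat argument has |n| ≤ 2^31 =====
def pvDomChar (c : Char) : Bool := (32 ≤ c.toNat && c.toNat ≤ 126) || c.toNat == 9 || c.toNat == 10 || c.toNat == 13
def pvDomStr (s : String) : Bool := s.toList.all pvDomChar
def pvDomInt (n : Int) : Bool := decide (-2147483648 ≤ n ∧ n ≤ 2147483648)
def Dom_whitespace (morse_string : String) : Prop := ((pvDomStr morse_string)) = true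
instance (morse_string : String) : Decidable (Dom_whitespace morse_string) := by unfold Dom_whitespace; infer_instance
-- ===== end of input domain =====

-- B replaces A's cursor-and-repeated-find loop by a single enumerate pass collecting
-- space indexes, then appending the terminal -1 (objective: simpler).


-- ===== PORT A =====
-- the while-True loop; fuel (length+1) is a totality guard only, proved sufficient below
def whitespaceGo (l : List Char) (fuel : Nat) (x : Int) (acc : List Int) : List Int :=
  match fuel with
  | 0 => acc
  | fuel + 1 =>
    let i := PySem.Chars.findFrom l [' '] x none
    if i = -1 then acc ++ [i] else whitespaceGo l fuel (i + 1) (acc ++ [i])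

def whitespace (morse_string : String) : List Int :=
  whitespaceGo morse_string.toList (morse_string.toList.length + 1) 0 []

-- ===== PORT B =====
def whitespace_alt (morse_string : String) : List Int :=
  ((PySem.List.enumerate morse_string.toList 0).foldl
      (fun acc p => if p.2 = ' ' then acc ++ [p.1] else acc) []) ++ [-1]

-- ===== PRECONDITION & SPEC =====
def Spec_whitespace (morse_string : String) (out : List Int) : Prop := out = whitespace_alt morse_string
instance (morse_string : String) (out : List Int) : Decidable (Spec_whitespace morse_string out) := by unfold Spec_whitespace; infer_instance

-- ===== CLAIM (what is proved, stated in full; the proofs are below) =====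
def Claim_equal_whitespace : Prop := ∀ (morse_string : String), Dom_whitespace morse_string → Spec_whitespace morse_string (whitespace morse_string)

-- ===== LEMMAS AND PROOFS =====

-- canonical result of the scan from cursor k
def gSpace : List Char → Int → List Int
  | [], _ => [-1]
  | c :: cs, k => if c = ' ' then k :: gSpace cs (k + 1) else gSpace cs (k + 1)

theorem gSpace_no_space (m : List Char) (k : Int) (h : ' ' ∉ m) : gSpace m k = [-1] := by
  induction m generalizing k with
  | nil => rfl
  | cons c cs ih =>
    simp only [List.mem_cons, not_or] at h
    have hc : c ≠ ' ' := fun e => h.1 e.symm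
    simp [gSpace, hc, ih _ h.2]

theorem gSpace_first (m : List Char) (k : Int) (j : Nat) (hj : j < m.length)
    (hs : m[j] = ' ') (hmin : ∀ i (h : i < j), m[i]'(by omega) ≠ ' ') :
    gSpace m k = (k + j) :: gSpace (m.drop (j + 1)) (k + j + 1) := by
  induction j generalizing m k with
  | zero =>
    cases m with
    | nil => simp at hj
    | cons c cs => simp_all [gSpace]
  | succ j ih =>
    cases m with
    | nil => simp at hj
    | cons c cs =>
      have hc : c ≠ ' ' := hmin 0 (by omega)
      have := ih cs (k + 1) (by simpa using hj) (by simpa using hs)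
        (fun i h => by simpa using hmin (i + 1) (by omega))
      simp only [gSpace, if_neg hc, this, List.drop_succ_cons]
      have h1 : k + 1 + (j : Int) = k + ((j + 1 : Nat) : Int) := by push_cast; ring
      rw [h1]

theorem singleton_infix_iff (a : Char) (m : List Char) : [a] <:+: m ↔ a ∈ m := by
  constructor
  · rintro ⟨s, t, rfl⟩; simp
  · intro h
    obtain ⟨s, t, rfl⟩ := List.append_of_mem h
    exact ⟨s, t, by simp⟩

-- A-side invariant: with the cursor at x ≤ length and enough fuel, the loop produces gSpace of the rest
theorem whitespaceGo_eq (l : List Char) (fuel x : Nat) (hx : x ≤ l.length)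
    (hfuel : l.length + 1 - x ≤ fuel) (acc : List Int) :
    whitespaceGo l fuel (x : Int) acc = acc ++ gSpace (l.drop x) (x : Int) := by
  induction fuel generalizing x acc with
  | zero => omega
  | succ fuel ih =>
    simp only [whitespaceGo]
    rw [PySem.Chars.findFrom_natCast l [' '] x hx]
    by_cases hf : PySem.Chars.find (l.drop x) [' '] = -1
    · rw [if_pos hf, if_pos rfl, gSpace_no_space (l.drop x) (x : Int)]
      rw [PySem.Chars.find_eq_neg_one_iff] at hf
      exact fun h => hf ((singleton_infix_iff _ _).mpr h)
    · have hpos : 0 ≤ PySem.Chars.find (l.drop x) [' '] := by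
        have := PySem.Chars.neg_one_le_find (l.drop x) [' ']; omega
      rw [if_neg hf, if_neg (by omega)]
      set j := (PySem.Chars.find (l.drop x) [' ']).toNat with hjdef
      have hjcast : PySem.Chars.find (l.drop x) [' '] = (j : Int) := by omega
      obtain ⟨hpre, hmin⟩ := PySem.Chars.find_spec hpos
      rw [← hjdef] at hpre hmin
      have hjlt : j < (l.drop x).length := by
        by_contra h
        rw [List.drop_eq_nil_iff.mpr (by omega)] at hpre
        simp [List.prefix_nil] at hpre
      have hlen : (l.drop x).length = l.length - x := by simp
      have hsj : (l.drop x)[j] = ' ' := by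
        have h2 := hpre
        rw [List.prefix_iff_getElem] at h2
        have h3 := h2.2 0 (by simp)
        simpa using h3.symm
      have hminj : ∀ i (h : i < j), (l.drop x)[i]'(by omega) ≠ ' ' := by
        intro i h hcontra
        apply hmin i h
        rw [List.prefix_iff_getElem]
        refine ⟨by simp only [List.length_singleton, List.length_drop]; omega, ?_⟩
        intro k hk
        simp only [List.length_singleton] at hk
        have hk0 : k = 0 := by omega
        subst hk0
        simpa using hcontra.symm
      have hdrop : x + j < l.length := by simp at hjlt; omega
      have hrec := ih (x + j + 1) (by omega) (by omega)
        (acc ++ [(x : Int) + PySem.Chars.find (l.drop x) [' ']])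
      rw [show ((x + j + 1 : Nat) : Int) = (x : Int) + PySem.Chars.find (l.drop x) [' '] + 1 by
        rw [hjcast]; push_cast; ring] at hrec
      rw [hrec, gSpace_first (l.drop x) (x : Int) j hjlt hsj hminj]
      rw [List.drop_drop, hjcast]
      simp only [List.append_assoc, List.singleton_append]
      congr 2

-- B-side: the enumerate fold produces gSpace as well
theorem foldl_enumerate_eq (l : List Char) (k : Int) (acc : List Int) :
    ((PySem.List.enumerate l k).foldl
        (fun acc p => if p.2 = ' ' then acc ++ [p.1] else acc) acc) ++ [-1] =
      acc ++ gSpace l k := by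
  induction l generalizing k acc with
  | nil => simp [PySem.List.enumerate_nil, gSpace]
  | cons c cs ih =>
    rw [PySem.List.enumerate_cons]
    simp only [List.foldl_cons, gSpace]
    by_cases hc : c = ' '
    · rw [if_pos hc, if_pos hc, ih]
      simp
    · rw [if_neg hc, if_neg hc, ih]

-- ===== VERDICT (by name: the statement is the Claim_ definition above) =====
theorem whitespace_spec : Claim_equal_whitespace := by
  intro s _
  unfold Spec_whitespace whitespace whitespace_alt
  have hA := whitespaceGo_eq s.toList (s.toList.length + 1) 0 (by omega) (by omega) []
  have hB := foldl_enumerate_eq s.toList 0 []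
  simp only [Nat.cast_zero] at hA
  rw [hA, hB]
  simp
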